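-- pv_equiv track=rewrite | github.com/peejh/coding-practice | HackerRank/Problem Solving/algorithms/bitManipulation_sansaXor.py | sansaXor_listInPlace
-- ===== SOURCE A (Python) =====
-- def sansaXor_listInPlace(arr):
--     '''
--     same as above but stores the running XORs in the
--     original array
--     '''
--     total = 0
--
--     for i in range(len(arr)):
--         for j in range(i):
--             arr[j] ^= arr[i]
--             total ^= arr[j]
--         total ^= arr[i]
--
--     return total
-- ===== SOURCE B (Python) =====
-- def sansaXor_listInPlace(arr):
--     # XOR of all contiguous-subarray XORs: elements at odd index occur an
--     # even number of times and cancel; everything cancels when len is even.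
--     if len(arr) % 2 == 0:
--         return 0
--     total = 0
--     take = True
--     for x in arr:
--         if take:
--             total ^= x
--         take = not take
--     return total
-- ===== Notes on version B (the rewrite author's own statement) =====
-- stated objective: faster
-- what changed: Replaced the quadratic nested loops that store running subarray XORs back into the array by a single pass using the parity argument: the result is 0 for even length, else the XOR of even-indexed elements.
import Mathlib
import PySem

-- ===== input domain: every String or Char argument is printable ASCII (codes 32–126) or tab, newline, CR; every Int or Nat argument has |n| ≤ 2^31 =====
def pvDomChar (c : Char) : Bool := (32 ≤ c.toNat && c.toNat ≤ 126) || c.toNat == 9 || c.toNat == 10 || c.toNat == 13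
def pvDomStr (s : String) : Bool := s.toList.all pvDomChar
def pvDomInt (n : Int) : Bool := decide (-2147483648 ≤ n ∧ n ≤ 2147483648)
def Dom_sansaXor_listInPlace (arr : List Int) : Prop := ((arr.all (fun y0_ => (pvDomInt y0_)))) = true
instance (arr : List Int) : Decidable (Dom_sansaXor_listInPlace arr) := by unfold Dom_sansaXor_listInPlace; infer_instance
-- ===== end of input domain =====

-- B replaces A's quadratic in-place nested loops by one linear pass (0 for even
-- length, else XOR of even-indexed elements); A mutates its argument, B does not:
-- the equivalence proved here is about the RETURN value only.

-- ===== PORT A =====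
def sansaXor_listInPlace (arr : List Int) : Int :=
  ((PySem.List.pyRange 0 (arr.length : Int) 1).foldl (fun (st : List Int × Int) i =>
      let st2 := (PySem.List.pyRange 0 i 1).foldl (fun (st2 : List Int × Int) j =>
        let a' := PySem.List.pySetD st2.1 j
          (PySem.Int.bxor (PySem.List.pyGetD st2.1 j 0) (PySem.List.pyGetD st2.1 i 0))
        (a', PySem.Int.bxor st2.2 (PySem.List.pyGetD a' j 0))) st
      (st2.1, PySem.Int.bxor st2.2 (PySem.List.pyGetD st2.1 i 0)))
    (arr, 0)).2

-- ===== PORT B =====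
def sansaXor_listInPlace_alt (arr : List Int) : Int :=
  if arr.length % 2 == 0 then 0
  else
    (arr.foldl (fun (st : Int × Bool) x =>
      (if st.2 then PySem.Int.bxor st.1 x else st.1, !st.2)) (0, true)).1

-- ===== PRECONDITION & SPEC =====
def Spec_sansaXor_listInPlace (arr : List Int) (out : Int) : Prop := out = sansaXor_listInPlace_alt arr
instance (arr : List Int) (out : Int) : Decidable (Spec_sansaXor_listInPlace arr out) := by unfold Spec_sansaXor_listInPlace; infer_instance

-- ===== CLAIM (what is proved, stated in full; the proofs are below) =====
def Claim_equal_sansaXor_listInPlace : Prop := ∀ (arr : List Int), Dom_sansaXor_listInPlace arr → Spec_sansaXor_listInPlace arr (sansaXor_listInPlace arr)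

-- ===== LEMMAS AND PROOFS =====

-- ---- XOR algebra: associativity of PySem.Int.bxor via the two's-complement encoding ----

def pvEnc (s : Bool) (n : Nat) : Int := if s then -(n : Int) - 1 else (n : Int)

theorem pvEnc_bxor (s1 : Bool) (n1 : Nat) (s2 : Bool) (n2 : Nat) :
    PySem.Int.bxor (pvEnc s1 n1) (pvEnc s2 n2) = pvEnc (Bool.xor s1 s2) (n1 ^^^ n2) := by
  cases s1 <;> cases s2 <;>
    simp [pvEnc, PySem.Int.bxor] <;> omega

theorem pvEnc_surj (a : Int) : ∃ s n, a = pvEnc s n := by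
  by_cases h : 0 ≤ a
  · exact ⟨false, a.toNat, by simp [pvEnc]; omega⟩
  · exact ⟨true, (-a - 1).toNat, by simp [pvEnc]; omega⟩

theorem bxor_assoc (a b c : Int) :
    PySem.Int.bxor (PySem.Int.bxor a b) c = PySem.Int.bxor a (PySem.Int.bxor b c) := by
  obtain ⟨sa, na, rfl⟩ := pvEnc_surj a
  obtain ⟨sb, nb, rfl⟩ := pvEnc_surj b
  obtain ⟨sc, nc, rfl⟩ := pvEnc_surj c
  rw [pvEnc_bxor, pvEnc_bxor, pvEnc_bxor, pvEnc_bxor, Bool.xor_assoc, Nat.xor_assoc]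

theorem zero_bxor (a : Int) : PySem.Int.bxor 0 a = a := by
  rw [PySem.Int.bxor_comm, PySem.Int.bxor_zero]

theorem bxor_left_comm (a b c : Int) :
    PySem.Int.bxor a (PySem.Int.bxor b c) = PySem.Int.bxor b (PySem.Int.bxor a c) := by
  rw [← bxor_assoc, PySem.Int.bxor_comm a b, bxor_assoc]

theorem bxor_cancel_left (a b : Int) : PySem.Int.bxor a (PySem.Int.bxor a b) = b := by
  rw [← bxor_assoc, PySem.Int.bxor_self, zero_bxor]

-- ---- even/odd-indexed XOR and suffix XORs ----

def xorL (l : List Int) : Int := l.foldl PySem.Int.bxor 0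

mutual
def exor : List Int → Int
  | [] => 0
  | h :: t => PySem.Int.bxor h (oxor t)
def oxor : List Int → Int
  | [] => 0
  | _ :: t => exor t
end

def sfx : List Int → List Int
  | [] => []
  | h :: t => PySem.Int.bxor h ((sfx t).headD 0) :: sfx t

theorem foldl_bxor (l : List Int) (t : Int) :
    l.foldl PySem.Int.bxor t = PySem.Int.bxor t (xorL l) := by
  induction l generalizing t with
  | nil => simp [xorL]
  | cons h l ih =>
      simp only [xorL, List.foldl_cons] at *
      rw [ih, ih (PySem.Int.bxor 0 h), zero_bxor, bxor_assoc]

theorem xorL_cons (h : Int) (l : List Int) :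
    xorL (h :: l) = PySem.Int.bxor h (xorL l) := by
  simp only [xorL, List.foldl_cons, zero_bxor]
  exact foldl_bxor l h

theorem xorL_eq_exor_oxor (l : List Int) :
    xorL l = PySem.Int.bxor (exor l) (oxor l) := by
  induction l with
  | nil => simp [xorL, exor, oxor]
  | cons h t ih =>
      rw [xorL_cons, ih, exor, oxor, bxor_assoc]
      rw [PySem.Int.bxor_comm (oxor t) (exor t)]

theorem length_sfx (l : List Int) : (sfx l).length = l.length := by
  induction l with
  | nil => rfl
  | cons h t ih => simp [sfx, ih]

theorem headD_sfx (l : List Int) : (sfx l).headD 0 = xorL l := by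
  induction l with
  | nil => simp [sfx, xorL]
  | cons h t ih => simp only [sfx, List.headD_cons, xorL_cons]; rw [ih]

theorem xorL_sfx (l : List Int) : xorL (sfx l) = exor l := by
  induction l with
  | nil => simp [sfx, xorL, exor]
  | cons h t ih =>
      rw [sfx, xorL_cons, headD_sfx, ih, xorL_eq_exor_oxor, exor]
      simp [bxor_assoc, PySem.Int.bxor_comm, bxor_left_comm, bxor_cancel_left]

theorem sfx_append (l : List Int) (x : Int) :
    sfx (l ++ [x]) = (sfx l).map (fun y => PySem.Int.bxor y x) ++ [x] := by
  induction l with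
  | nil => simp [sfx]
  | cons h t ih =>
      simp only [List.cons_append, sfx, ih, List.map_cons, List.cons_append]
      cases t with
      | nil => simp [sfx, zero_bxor]
      | cons a t' =>
          simp only [sfx, List.map_cons, List.headD_cons, List.cons_append, List.headD_cons]
          congr 1
          simp [bxor_assoc, PySem.Int.bxor_comm, bxor_left_comm]

theorem exor_oxor_append (l : List Int) (x : Int) :
    exor (l ++ [x]) = (if l.length % 2 = 0 then PySem.Int.bxor (exor l) x else exor l) ∧
    oxor (l ++ [x]) = (if l.length % 2 = 0 then oxor l else PySem.Int.bxor (oxor l) x) := by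
  induction l with
  | nil => simp [exor, oxor, zero_bxor]
  | cons h t ih =>
      obtain ⟨ih1, ih2⟩ := ih
      constructor
      · simp only [List.cons_append, exor, ih2, List.length_cons]
        rcases Nat.even_or_odd t.length with he | ho
        · have h0 : t.length % 2 = 0 := Nat.even_iff.mp he
          simp [h0, Nat.succ_mod_two_eq_one_iff.mpr h0]
        · have h1 : t.length % 2 = 1 := Nat.odd_iff.mp ho
          simp [h1, Nat.succ_mod_two_eq_zero_iff.mpr h1, bxor_assoc]
      · simp only [List.cons_append, oxor, ih1, List.length_cons]
        rcases Nat.even_or_odd t.length with he | ho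
        · have h0 : t.length % 2 = 0 := Nat.even_iff.mp he
          simp [h0, Nat.succ_mod_two_eq_one_iff.mpr h0]
        · have h1 : t.length % 2 = 1 := Nat.odd_iff.mp ho
          simp [h1, Nat.succ_mod_two_eq_zero_iff.mpr h1]

theorem xorL_map_bxor (l : List Int) (x : Int) :
    xorL (l.map (fun y => PySem.Int.bxor y x)) =
      (if l.length % 2 = 0 then xorL l else PySem.Int.bxor (xorL l) x) := by
  induction l with
  | nil => simp
  | cons h t ih =>
      simp only [List.map_cons, xorL_cons, ih, List.length_cons]
      rcases Nat.even_or_odd t.length with he | ho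
      · have h0 : t.length % 2 = 0 := Nat.even_iff.mp he
        simp only [h0, if_pos rfl, Nat.succ_mod_two_eq_one_iff.mpr h0,
          if_neg (by omega : ¬ (1 : Nat) = 0)]
        simp [bxor_assoc, PySem.Int.bxor_comm, bxor_left_comm]
      · have h1 : t.length % 2 = 1 := Nat.odd_iff.mp ho
        simp only [h1, if_neg (by omega : ¬ (1:Nat) = 0),
          Nat.succ_mod_two_eq_zero_iff.mpr h1, if_pos rfl]
        simp [bxor_assoc, PySem.Int.bxor_comm, bxor_left_comm, bxor_cancel_left]

-- ---- B characterization ----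

theorem flag_fold (l : List Int) (t : Int) :
    (l.foldl (fun (st : Int × Bool) x =>
        (if st.2 then PySem.Int.bxor st.1 x else st.1, !st.2)) (t, true)
      = (PySem.Int.bxor t (exor l), decide (l.length % 2 = 0))) ∧
    (l.foldl (fun (st : Int × Bool) x =>
        (if st.2 then PySem.Int.bxor st.1 x else st.1, !st.2)) (t, false)
      = (PySem.Int.bxor t (oxor l), decide (l.length % 2 = 1))) := by
  induction l generalizing t with
  | nil => simp [exor, oxor]
  | cons h l ih =>
      constructor
      · simp only [List.foldl_cons, Bool.not_true, List.length_cons, if_true]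
        rw [(ih (PySem.Int.bxor t h)).2, exor, ← bxor_assoc]
        congr 1
        simp only [decide_eq_decide]
        omega
      · simp only [List.foldl_cons, Bool.not_false, List.length_cons]
        rw [if_neg (by simp), (ih t).1, oxor]
        congr 1
        simp only [decide_eq_decide]
        omega

theorem altEq (arr : List Int) :
    sansaXor_listInPlace_alt arr = (if arr.length % 2 = 0 then 0 else exor arr) := by
  by_cases h : arr.length % 2 = 0 <;>
    simp [sansaXor_listInPlace_alt, h, (flag_fold arr 0).1, zero_bxor]

-- ---- A characterization ----

def innerStep (i : Int) (st : List Int × Int) (j : Int) : List Int × Int :=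
  let a' := PySem.List.pySetD st.1 j
    (PySem.Int.bxor (PySem.List.pyGetD st.1 j 0) (PySem.List.pyGetD st.1 i 0))
  (a', PySem.Int.bxor st.2 (PySem.List.pyGetD a' j 0))

def outerStep (st : List Int × Int) (i : Int) : List Int × Int :=
  let st2 := (PySem.List.pyRange 0 i 1).foldl (innerStep i) st
  (st2.1, PySem.Int.bxor st2.2 (PySem.List.pyGetD st2.1 i 0))

theorem portA_eq (arr : List Int) :
    sansaXor_listInPlace arr =
      ((PySem.List.pyRange 0 (arr.length : Int) 1).foldl outerStep (arr, 0)).2 := rfl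

theorem innerFold_len (i : Int) (js : List Int) (st : List Int × Int) :
    ((js.foldl (innerStep i) st).1).length = st.1.length := by
  induction js generalizing st with
  | nil => rfl
  | cons j js ih => rw [List.foldl_cons, ih]; simp [innerStep, PySem.List.length_pySetD]

theorem pyGetD_append_left (l : List Int) (x : Int) (j : Int) (h0 : 0 ≤ j) (h : j < (l.length : Int)) :
    PySem.List.pyGetD (l ++ [x]) j 0 = PySem.List.pyGetD l j 0 := by
  rw [PySem.List.pyGetD_eq_getElem _ _ h0 (by simp; omega),
    PySem.List.pyGetD_eq_getElem _ _ h0 h]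
  exact List.getElem_append_left (by omega)

theorem pySetD_append_left (l : List Int) (x v : Int) (j : Int) (h0 : 0 ≤ j) (h : j < (l.length : Int)) :
    PySem.List.pySetD (l ++ [x]) j v = PySem.List.pySetD l j v ++ [x] := by
  rw [PySem.List.pySetD_of_nonneg _ _ h0, PySem.List.pySetD_of_nonneg _ _ h0]
  exact List.set_append_left _ _ (by omega)

theorem pyGetD_append_length (l : List Int) (x : Int) :
    PySem.List.pyGetD (l ++ [x]) (l.length : Int) 0 = x := by
  rw [PySem.List.pyGetD_natCast]
  simp [List.getD, List.getElem?_append_right (le_refl l.length)]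

theorem pyGetD_append_cons (p : List Int) (y : Int) (r : List Int) :
    PySem.List.pyGetD (p ++ y :: r) (p.length : Int) 0 = y := by
  rw [PySem.List.pyGetD_natCast]
  simp [List.getD, List.getElem?_append_right (le_refl p.length)]

theorem pySetD_append_cons (p : List Int) (y : Int) (r : List Int) (v : Int) :
    PySem.List.pySetD (p ++ y :: r) (p.length : Int) v = p ++ v :: r := by
  rw [PySem.List.pySetD_natCast, List.set_append_right _ _ (le_refl p.length)]
  simp

theorem innerStep_len (i : Int) (st : List Int × Int) (j : Int) :
    (innerStep i st j).1.length = st.1.length := by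
  simp [innerStep, PySem.List.length_pySetD]

theorem innerStep_append (i j : Int) (l : List Int) (t x : Int)
    (hi : 0 ≤ i ∧ i < (l.length : Int)) (hj : 0 ≤ j ∧ j < (l.length : Int)) :
    innerStep i (l ++ [x], t) j = ((innerStep i (l, t) j).1 ++ [x], (innerStep i (l, t) j).2) := by
  simp only [innerStep]
  rw [pyGetD_append_left l x j hj.1 hj.2, pyGetD_append_left l x i hi.1 hi.2,
    pySetD_append_left l x _ j hj.1 hj.2,
    pyGetD_append_left _ x j hj.1 (by rw [PySem.List.length_pySetD]; exact hj.2)]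

theorem innerFold_append (i x : Int) : ∀ (js : List Int) (l : List Int) (t : Int),
    (0 ≤ i ∧ i < (l.length : Int)) → (∀ j ∈ js, 0 ≤ j ∧ j < (l.length : Int)) →
    js.foldl (innerStep i) (l ++ [x], t) =
      ((js.foldl (innerStep i) (l, t)).1 ++ [x], (js.foldl (innerStep i) (l, t)).2) := by
  intro js
  induction js with
  | nil => intro l t _ _; rfl
  | cons j js ih =>
      intro l t hi hjs
      have hj := hjs j (List.mem_cons_self)
      rw [List.foldl_cons, List.foldl_cons, innerStep_append i j l t x hi hj]
      have hlen : ((innerStep i (l, t) j).1).length = l.length := innerStep_len i (l, t) j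
      have h2 := ih (innerStep i (l, t) j).1 (innerStep i (l, t) j).2
        (by rw [hlen]; exact hi)
        (fun j' hmem => by rw [hlen]; exact hjs j' (List.mem_cons_of_mem _ hmem))
      simpa using h2

theorem outerStep_append (i : Int) (l : List Int) (t x : Int)
    (hi : 0 ≤ i ∧ i < (l.length : Int)) :
    outerStep (l ++ [x], t) i = ((outerStep (l, t) i).1 ++ [x], (outerStep (l, t) i).2) := by
  simp only [outerStep]
  rw [innerFold_append i x _ l t hi
    (fun j hmem => by
      have := PySem.List.mem_pyRange_one.mp hmem
      exact ⟨this.1, lt_trans this.2 hi.2⟩)]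
  rw [pyGetD_append_left _ x i hi.1
    (by rw [innerFold_len]; exact hi.2)]

theorem outerFold_append (x : Int) : ∀ (is : List Int) (l : List Int) (t : Int),
    (∀ i ∈ is, 0 ≤ i ∧ i < (l.length : Int)) →
    is.foldl outerStep (l ++ [x], t) =
      ((is.foldl outerStep (l, t)).1 ++ [x], (is.foldl outerStep (l, t)).2) := by
  intro is
  induction is with
  | nil => intro l t _; rfl
  | cons i is ih =>
      intro l t his
      have hi := his i (List.mem_cons_self)
      rw [List.foldl_cons, List.foldl_cons, outerStep_append i l t x hi]
      have hlen : ((outerStep (l, t) i).1).length = l.length := by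
        simp [outerStep, innerFold_len]
      have h2 := ih (outerStep (l, t) i).1 (outerStep (l, t) i).2
        (fun i' hmem => by rw [hlen]; exact his i' (List.mem_cons_of_mem _ hmem))
      simpa using h2

theorem inner_spec (x : Int) : ∀ (s : List Int) (p : List Int) (t : Int) (n : Int),
    n = (p.length : Int) + (s.length : Int) →
    (PySem.List.pyRange (p.length : Int) n 1).foldl (innerStep n) (p ++ s ++ [x], t) =
      (p ++ s.map (fun y => PySem.Int.bxor y x) ++ [x],
        PySem.Int.bxor t (xorL (s.map (fun y => PySem.Int.bxor y x)))) := by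
  intro s
  induction s with
  | nil =>
      intro p t n hn
      rw [PySem.List.pyRange_one_eq_nil (by simp at hn; omega)]
      simp [xorL]
  | cons y s ih =>
      intro p t n hn
      rw [PySem.List.pyRange_one_cons (by simp only [List.length_cons] at hn; push_cast at hn; omega), List.foldl_cons]
      have hstep : innerStep n (p ++ (y :: s) ++ [x], t) (p.length : Int) =
          (p ++ PySem.Int.bxor y x :: (s ++ [x]), PySem.Int.bxor t (PySem.Int.bxor y x)) := by
        simp only [innerStep]
        have h1 : PySem.List.pyGetD (p ++ (y :: s) ++ [x]) (p.length : Int) 0 = y := by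
          rw [List.append_assoc, List.cons_append]
          exact pyGetD_append_cons p y (s ++ [x])
        have h2 : PySem.List.pyGetD (p ++ (y :: s) ++ [x]) n 0 = x := by
          rw [hn]
          have : ((p.length : Int) + ((y :: s).length : Int)) = (((p ++ (y :: s)).length : Int)) := by
            push_cast; simp
          rw [this]
          exact pyGetD_append_length (p ++ (y :: s)) x
        have h3 : PySem.List.pySetD (p ++ (y :: s) ++ [x]) (p.length : Int)
            (PySem.Int.bxor y x) = p ++ PySem.Int.bxor y x :: (s ++ [x]) := by
          rw [List.append_assoc, List.cons_append]
          exact pySetD_append_cons p y (s ++ [x]) (PySem.Int.bxor y x)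
        rw [h1, h2, h3, pyGetD_append_cons p (PySem.Int.bxor y x) (s ++ [x])]
      rw [hstep]
      have h4 := ih (p ++ [PySem.Int.bxor y x]) (PySem.Int.bxor t (PySem.Int.bxor y x)) n
        (by simp only [List.length_cons, List.length_append, List.length_singleton, List.length_nil] at hn ⊢; push_cast at hn; omega)
      have h5 : ((p ++ [PySem.Int.bxor y x]).length : Int) = (p.length : Int) + 1 := by
        push_cast; simp
      rw [h5] at h4
      simp only [List.append_assoc, List.cons_append, List.nil_append] at h4 ⊢
      rw [h4]
      simp only [List.map_cons, xorL_cons, List.cons_append]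
      rw [bxor_assoc]

theorem runA (a : List Int) :
    (PySem.List.pyRange 0 (a.length : Int) 1).foldl outerStep (a, 0) =
      (sfx a, if a.length % 2 = 0 then 0 else exor a) := by
  induction a using List.reverseRecOn with
  | nil => rfl
  | append_singleton a x ih =>
      have hlen : (((a ++ [x]).length : Nat) : Int) = (a.length : Int) + 1 := by
        simp
      rw [hlen, PySem.List.pyRange_one_succ_right (by positivity), List.foldl_append,
        outerFold_append x _ a 0
          (fun i hmem => by
            have := PySem.List.mem_pyRange_one.mp hmem
            exact ⟨this.1, this.2⟩),
        ih]
      simp only [List.foldl_cons, List.foldl_nil]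
      -- the final outer step, at index n = a.length, on (sfx a ++ [x], tot)
      rw [show ((sfx a, if a.length % 2 = 0 then (0:Int) else exor a).1 ++ [x],
            (sfx a, if a.length % 2 = 0 then (0:Int) else exor a).2) =
          (sfx a ++ [x], if a.length % 2 = 0 then (0:Int) else exor a) from rfl]
      have hinner := inner_spec x (sfx a) []
        (if a.length % 2 = 0 then (0:Int) else exor a) (a.length : Int)
        (by simp [length_sfx])
      simp only [List.nil_append, List.length_nil, Nat.cast_zero] at hinner
      simp only [outerStep]
      rw [hinner]
      have hget : PySem.List.pyGetD
          ((sfx a).map (fun y => PySem.Int.bxor y x) ++ [x]) (a.length : Int) 0 = x := by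
        have : ((sfx a).map (fun y => PySem.Int.bxor y x)).length = a.length := by
          simp [length_sfx]
        rw [← this]
        exact pyGetD_append_length _ x
      rw [hget, sfx_append]
      rcases Nat.even_or_odd a.length with he | ho
      · have h0 : a.length % 2 = 0 := Nat.even_iff.mp he
        have h1 : (a ++ [x]).length % 2 = 1 := by simp [List.length_append]; omega
        rw [xorL_map_bxor, length_sfx, if_pos h0, xorL_sfx]
        simp only [h0, if_pos rfl, h1, if_neg (by omega : ¬ (1:Nat) = 0)]
        rw [(exor_oxor_append a x).1, if_pos h0, zero_bxor]
        simp
      · have h1 : a.length % 2 = 1 := Nat.odd_iff.mp ho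
        have h0 : (a ++ [x]).length % 2 = 0 := by simp [List.length_append]; omega
        rw [xorL_map_bxor, length_sfx, if_neg (by omega), xorL_sfx]
        simp only [if_neg (by omega : ¬ a.length % 2 = 0), h0, if_pos rfl]
        simp [bxor_assoc, PySem.Int.bxor_comm, bxor_left_comm, bxor_cancel_left]

-- ===== VERDICT (by name: the statement is the Claim_ definition above) =====
theorem sansaXor_listInPlace_spec : Claim_equal_sansaXor_listInPlace := by
  intro arr _
  unfold Spec_sansaXor_listInPlace
  rw [portA_eq, runA, altEq]
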